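-- pv_equiv track=rewrite | github.com/tangleon8/mqqt-client-benchmark | mqqt-client-benchmark.py | find_described_purposes
-- ===== SOURCE A (Python) =====
-- import itertools
--
-- def find_described_purposes(purpose_filter: str) -> list[str]:
--     filter_levels = purpose_filter.split('/')
--     decomposed_levels = []
--     for level in filter_levels:
--         if '{' in level:
--             level = level.replace('{', '').replace('}', '').split(',')
--         else:
--             level = [level]
--         decomposed_levels.append(level)
--     described_purposes = []
--     for purpose_list in itertools.product(*decomposed_levels):
--         purpose = '/'.join(purpose_list)
--         if not './' in purpose:
--             purpose = purpose.replace('/.', '')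
--             described_purposes.append(purpose)
--     return described_purposes
-- ===== SOURCE B (Python) =====
-- def find_described_purposes(purpose_filter: str) -> list[str]:
--     # Recursive descent over the levels: prune '.'-ending options before a separator
--     # (they would create './') and clean '/.'-joins incrementally while building,
--     # instead of enumerating full product tuples, joining, substring-testing and replacing.
--     def options(seg):
--         if '{' in seg:
--             return seg.replace('{', '').replace('}', '').split(',')
--         return [seg]
--
--     def expand(segs, first):
--         if not segs:
--             return ['']
--         rest = expand(segs[1:], False)
--         out = []
--         for o in options(segs[0]):
--             if segs[1:] and o.endswith('.'):
--                 continue  # a '/' follows: joined string would contain './'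
--             piece = o if first else (o[1:] if o.startswith('.') else '/' + o)
--             for t in rest:
--                 out.append(piece + t)
--         return out
--
--     return expand(purpose_filter.split('/'), True)
-- ===== Notes on version B (the rewrite author's own statement) =====
-- stated objective: alternative
-- what changed: B replaces product-enumeration + join + './'-substring filter + '/.'-replace post-passes by a recursive descent over the levels that prunes '.'-ending options before a separator and performs the '/.' cleanup incrementally at join time, so no complete tuple, joined candidate string, substring search or replace pass ever exists.
import Mathlib
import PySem

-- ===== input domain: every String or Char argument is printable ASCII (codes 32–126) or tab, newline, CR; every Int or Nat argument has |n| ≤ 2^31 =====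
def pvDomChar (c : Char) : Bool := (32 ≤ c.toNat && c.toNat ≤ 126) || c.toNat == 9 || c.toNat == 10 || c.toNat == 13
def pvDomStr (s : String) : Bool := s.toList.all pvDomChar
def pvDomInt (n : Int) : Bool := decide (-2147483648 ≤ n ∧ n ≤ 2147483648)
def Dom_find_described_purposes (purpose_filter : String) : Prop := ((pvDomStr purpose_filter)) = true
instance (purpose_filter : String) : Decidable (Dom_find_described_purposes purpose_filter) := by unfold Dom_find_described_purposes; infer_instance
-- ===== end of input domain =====

-- B replaces A's product-enumeration + join + './' substring filter + '/.' replace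
-- post-passes by a recursive descent over the levels that prunes '.'-ending options
-- before a separator and cleans '/.' joins incrementally while building; same results.

-- s.split(sep) for nonempty sep (both ports' splits use this; exact = PySem.Chars.splitOn)
def pySplit (s sep : String) : List String :=
  (PySem.Chars.splitOn s.toList sep.toList).map String.ofList

-- ===== PORT A =====
-- itertools.product(*lists): rightmost factor varies fastest (exact for this order)
def pyProduct {α : Type} : List (List α) → List (List α)
  | [] => [[]]
  | l :: ls => l.flatMap (fun x => (pyProduct ls).map (x :: ·))

def find_described_purposes (purpose_filter : String) : List String :=
  let filter_levels := pySplit purpose_filter "/"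
  let decomposed_levels := filter_levels.foldl (fun acc level =>
    acc ++ [if PySem.Str.isIn "{" level then
              pySplit (PySem.Str.replace (PySem.Str.replace level "{" "") "}" "") ","
            else [level]]) []
  (pyProduct decomposed_levels).foldl (fun acc purpose_list =>
    let purpose := PySem.Str.join "/" purpose_list
    if PySem.Str.isIn "./" purpose then acc
    else acc ++ [PySem.Str.replace purpose "/." ""]) []

-- ===== PORT B =====
-- Python '+' on str, exact on code points (String.append is kernel-opaque, so spelled out)
def strCat (a b : String) : String := String.ofList (a.toList ++ b.toList)

def optionsOf (seg : String) : List String :=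
  if PySem.Str.isIn "{" seg then
    pySplit (PySem.Str.replace (PySem.Str.replace seg "{" "") "}" "") ","
  else [seg]

-- o[1:] if o.startswith('.') else '/' + o
def connectorB (o : String) : String :=
  if PySem.Str.startswith o "." then PySem.Str.slice o (some 1) none else strCat "/" o

def expandB : List String → Bool → List String
  | [], _ => [""]
  | seg :: rest, first =>
    let restPaths := expandB rest false
    (optionsOf seg).foldl (fun out o =>
      if !rest.isEmpty && PySem.Str.endswith o "." then out
      else out ++ restPaths.map (fun t => strCat (if first then o else connectorB o) t)) []

def find_described_purposes_alt (purpose_filter : String) : List String :=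
  expandB (pySplit purpose_filter "/") true

-- ===== PRECONDITION & SPEC =====
def Spec_find_described_purposes (purpose_filter : String) (out : List String) : Prop := out = find_described_purposes_alt purpose_filter
instance (purpose_filter : String) (out : List String) : Decidable (Spec_find_described_purposes purpose_filter out) := by unfold Spec_find_described_purposes; infer_instance

-- ===== CLAIM (what is proved, stated in full; the proofs are below) =====
def Claim_equal_find_described_purposes : Prop := ∀ (purpose_filter : String), Dom_find_described_purposes purpose_filter → Spec_find_described_purposes purpose_filter (find_described_purposes purpose_filter)

-- ===== LEMMAS AND PROOFS =====

-- connC is B's connector on the char-list level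
def connC (x : List Char) : List Char :=
  if ['.'].isPrefixOf x then x.drop 1 else '/' :: x

-- what replace(s, '/.', '') computes: a left-to-right scan removing each '/.'
def dotScan : List Char → List Char
  | [] => []
  | [c] => [c]
  | c :: d :: t => if c = '/' ∧ d = '.' then dotScan t else c :: dotScan (d :: t)

-- no option other than the last ends with '.' (⟺ './' absent from the joined string)
def okTup : List (List Char) → Bool
  | [] => true
  | [_] => true
  | x :: y :: ys => !(PySem.Chars.endswith x ['.']) && okTup (y :: ys)

-- the cleaned joined string of a tuple (head taken bare iff first)
def glueC (first : Bool) (tup : List (List Char)) : List Char :=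
  if first then
    match tup with
    | [] => []
    | o :: t => o ++ t.flatMap connC
  else tup.flatMap connC

-- B's recursion on the char-list level
def expandC : List (List (List Char)) → Bool → List (List Char)
  | [], _ => [[]]
  | opts :: rest, first =>
    opts.flatMap (fun o =>
      if !rest.isEmpty && PySem.Chars.endswith o ['.'] then []
      else (expandC rest false).map (fun t => (if first then o else connC o) ++ t))

-- ---- generic list helpers ----

theorem flatMap_if_eq_filterMap {α β : Type} (c : α → Bool) (f : α → β) (l : List α) :
    l.flatMap (fun x => if c x then [] else [f x])
      = l.filterMap (fun x => if c x then none else some (f x)) := by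
  induction l with
  | nil => rfl
  | cons a l ih => by_cases h : c a <;> simp [h, ih]

theorem pyProduct_map {α β : Type} (f : α → β) (ls : List (List α)) :
    pyProduct (ls.map (List.map f)) = (pyProduct ls).map (List.map f) := by
  induction ls with
  | nil => rfl
  | cons l ls ih =>
    simp [pyProduct, ih, List.flatMap_map, List.map_flatMap, List.map_map]
    rfl

theorem mem_pyProduct_cons {α : Type} (l : List α) (x : List α) (ls : List (List α))
    (h : x ∈ pyProduct (l :: ls)) : ∃ a t, x = a :: t := by
  simp [pyProduct] at h
  obtain ⟨a, _, t, _, rfl⟩ := h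
  exact ⟨a, t, rfl⟩

theorem mem_mem_pyProduct {α : Type} (lvls : List (List α)) (tup : List α)
    (h : tup ∈ pyProduct lvls) : ∀ x ∈ tup, ∃ lvl ∈ lvls, x ∈ lvl := by
  induction lvls generalizing tup with
  | nil => simp [pyProduct] at h; subst h; simp
  | cons l ls ih =>
    simp [pyProduct] at h
    obtain ⟨a, ha, t, ht, rfl⟩ := h
    intro x hx
    rcases List.mem_cons.mp hx with rfl | hx
    · exact ⟨l, by simp, ha⟩
    · obtain ⟨lvl, hl, hxl⟩ := ih t ht x hx
      exact ⟨lvl, by simp [hl], hxl⟩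

-- ---- dotScan: replace(s, '/.', '') ----

theorem dotScan_cons_not_dotslash (c : Char) (t : List Char)
    (h : ¬ (['/', '.'].isPrefixOf (c :: t) = true)) :
    dotScan (c :: t) = c :: dotScan t := by
  cases t with
  | nil => simp [dotScan]
  | cons d t2 =>
    rw [dotScan, if_neg]
    rintro ⟨rfl, rfl⟩
    simp [List.isPrefixOf] at h

theorem replace_go_dotScan :
    ∀ (fuel : Nat) (s acc : List Char), s.length ≤ fuel →
      PySem.Chars.replace.go ['/', '.'] [] fuel s acc = acc.reverse ++ dotScan s := by
  intro fuel
  induction fuel with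
  | zero =>
    intro s acc h
    have hs : s = [] := List.eq_nil_of_length_eq_zero (Nat.le_zero.mp h)
    subst hs
    simp [PySem.Chars.replace.go, dotScan]
  | succ n ih =>
    intro s acc h
    cases s with
    | nil => simp [PySem.Chars.replace.go, dotScan]
    | cons c t =>
      rw [PySem.Chars.replace.go]
      by_cases hp : ['/', '.'].isPrefixOf (c :: t) = true
      · cases t with
        | nil => simp [List.isPrefixOf] at hp
        | cons d t' =>
          simp only [List.isPrefixOf, Bool.and_eq_true, beq_iff_eq] at hp
          obtain ⟨rfl, rfl, -⟩ := hp
          rw [if_pos (by simp [List.isPrefixOf])]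
          have hlen : t'.length ≤ n := by simp at h; omega
          have hdrop : List.drop (['/', '.'] : List Char).length ('/' :: '.' :: t') = t' := rfl
          rw [hdrop]
          simp only [List.reverse_nil, List.nil_append]
          rw [ih t' acc hlen, dotScan, if_pos ⟨rfl, rfl⟩]
      · rw [if_neg hp]
        have hlen : t.length ≤ n := by simp at h; omega
        rw [ih t (c :: acc) hlen, dotScan_cons_not_dotslash c t hp]
        simp

theorem replace_eq_dotScan (s : List Char) :
    PySem.Chars.replace s ['/', '.'] [] = dotScan s := by
  rw [PySem.Chars.replace, if_neg (by simp)]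
  simpa using replace_go_dotScan s.length s [] le_rfl

theorem dotScan_noSlash_append (o r : List Char) (h : '/' ∉ o) :
    dotScan (o ++ r) = o ++ dotScan r := by
  induction o with
  | nil => rfl
  | cons c o' ih =>
    have hc : c ≠ '/' := fun hc => h (by simp [hc])
    rw [List.cons_append,
      dotScan_cons_not_dotslash c (o' ++ r) (by simp [List.isPrefixOf]; intro hc'; exact absurd hc'.symm hc),
      ih (fun hm => h (by simp [hm]))]
    rfl

theorem dotScan_slash_cons (w : List Char) (hw : w.head? ≠ some '.') :
    dotScan ('/' :: w) = '/' :: dotScan w := by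
  cases w with
  | nil => simp [dotScan]
  | cons d w' =>
    rw [dotScan, if_neg]
    rintro ⟨-, rfl⟩
    simp at hw

theorem dotScan_tailStr (tup : List (List Char)) (h : ∀ x ∈ tup, '/' ∉ x) :
    dotScan (tup.flatMap (fun x => '/' :: x)) = tup.flatMap connC := by
  induction tup with
  | nil => rfl
  | cons x xs ih =>
    have hx : '/' ∉ x := h x (by simp)
    have hxs : ∀ y ∈ xs, '/' ∉ y := fun y hy => h y (by simp [hy])
    rw [List.flatMap_cons, List.flatMap_cons]
    by_cases hd : ['.'].isPrefixOf x = true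
    · obtain ⟨x', rfl⟩ : ∃ x', x = '.' :: x' := by
        cases x with
        | nil => simp [List.isPrefixOf] at hd
        | cons a x' =>
          simp only [List.isPrefixOf, Bool.and_eq_true, beq_iff_eq] at hd
          exact ⟨x', by rw [hd.1]⟩
      rw [List.cons_append, List.cons_append, dotScan, if_pos ⟨rfl, rfl⟩,
        dotScan_noSlash_append x' _ (fun hm => hx (by simp [hm])), ih hxs]
      simp [connC, hd]
    · have hhead : (x ++ xs.flatMap (fun y => '/' :: y)).head? ≠ some '.' := by
        cases x with
        | nil =>
          cases xs with
          | nil => simp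
          | cons y ys => simp
        | cons a x' =>
          simp only [List.cons_append, List.head?_cons, ne_eq, Option.some.injEq]
          intro ha
          rw [ha] at hd
          simp [List.isPrefixOf] at hd
      rw [List.cons_append, dotScan_slash_cons _ hhead,
        dotScan_noSlash_append x _ hx, ih hxs]
      simp [connC, hd]

-- ---- join ----

theorem join_cons_flat (o : List Char) (tup : List (List Char)) :
    PySem.Chars.join ['/'] (o :: tup) = o ++ tup.flatMap (fun x => '/' :: x) := by
  induction tup generalizing o with
  | nil => simp [PySem.Chars.join_singleton]
  | cons x xs ih =>
    rw [PySem.Chars.join_cons_cons, ih x, List.flatMap_cons]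
    simp

-- ---- isIn './' ----

theorem isIn_cons (sub : List Char) (c : Char) (t : List Char) :
    PySem.Chars.isIn sub (c :: t) = (sub.isPrefixOf (c :: t) || PySem.Chars.isIn sub t) := by
  rw [Bool.eq_iff_iff]
  simp only [Bool.or_eq_true, PySem.Chars.isIn_iff_infix, List.isPrefixOf_iff_prefix,
    List.infix_cons_iff]

theorem isIn_noSlash (o : List Char) (h : '/' ∉ o) :
    PySem.Chars.isIn ['.', '/'] o = false := by
  rw [PySem.Chars.isIn_eq_false_iff]
  intro hinf
  exact h (hinf.subset (by simp))

theorem endswith_cons₂ (a b : Char) (l : List Char) :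
    PySem.Chars.endswith (a :: b :: l) ['.'] = PySem.Chars.endswith (b :: l) ['.'] := by
  rw [Bool.eq_iff_iff]
  simp only [PySem.Chars.endswith, List.isSuffixOf_iff_suffix, List.suffix_cons_iff]
  constructor
  · rintro (habs | h)
    · simp at habs
    · exact h
  · exact Or.inr

theorem isIn_seg (o r : List Char) (h : '/' ∉ o) :
    PySem.Chars.isIn ['.', '/'] (o ++ '/' :: r)
      = (PySem.Chars.endswith o ['.'] || PySem.Chars.isIn ['.', '/'] r) := by
  induction o with
  | nil =>
    rw [List.nil_append, isIn_cons]
    simp [List.isPrefixOf, PySem.Chars.endswith, List.isSuffixOf]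
  | cons c o' ih =>
    have hc : c ≠ '/' := fun hc => h (by simp [hc])
    have h' : '/' ∉ o' := fun hm => h (by simp [hm])
    cases o' with
    | nil =>
      rw [List.cons_append, List.nil_append, isIn_cons, isIn_cons]
      by_cases hcc : c = '.'
      · subst hcc; simp [List.isPrefixOf, PySem.Chars.endswith, List.isSuffixOf]
      · simp [List.isPrefixOf, PySem.Chars.endswith, List.isSuffixOf]
    | cons d o'' =>
      have hd : d ≠ '/' := fun hd => h' (by simp [hd])
      rw [List.cons_append, isIn_cons, ih h', endswith_cons₂]
      have hpre : (['.', '/'] : List Char).isPrefixOf (c :: (d :: o'' ++ '/' :: r)) = false := by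
        simp [List.isPrefixOf, (Ne.symm hd)]
      rw [hpre, Bool.false_or]

theorem isIn_join_eq (tup : List (List Char)) (h : ∀ x ∈ tup, '/' ∉ x) :
    PySem.Chars.isIn ['.', '/'] (PySem.Chars.join ['/'] tup) = !okTup tup := by
  induction tup with
  | nil => simp [PySem.Chars.join, okTup]; decide
  | cons x xs ih =>
    have hx : '/' ∉ x := h x (by simp)
    have hxs : ∀ y ∈ xs, '/' ∉ y := fun y hy => h y (by simp [hy])
    cases xs with
    | nil =>
      rw [PySem.Chars.join_singleton, isIn_noSlash x hx]
      simp [okTup]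
    | cons y ys =>
      rw [PySem.Chars.join_cons_cons]
      rw [show x ++ ['/'] ++ PySem.Chars.join ['/'] (y :: ys)
            = x ++ '/' :: PySem.Chars.join ['/'] (y :: ys) by simp]
      rw [isIn_seg x _ hx, ih hxs]
      rw [okTup]
      cases PySem.Chars.endswith x ['.'] <;> simp

-- ---- splitOn / replace membership facts (options contain no '/') ----

theorem mem_replace_go (old new : List Char) :
    ∀ (fuel : Nat) (s acc : List Char) (c : Char),
      c ∈ PySem.Chars.replace.go old new fuel s acc → c ∈ new ∨ c ∈ s ∨ c ∈ acc := by
  intro fuel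
  induction fuel with
  | zero =>
    intro s acc c hc
    rw [PySem.Chars.replace.go] at hc
    simp at hc
    tauto
  | succ n ih =>
    intro s acc c hc
    cases s with
    | nil =>
      rw [PySem.Chars.replace.go] at hc
      · simp at hc; tauto
      · omega
    | cons a t =>
      rw [PySem.Chars.replace.go] at hc
      split at hc
      · rcases ih _ _ _ hc with h | h | h
        · tauto
        · exact Or.inr (Or.inl (List.mem_of_mem_drop h))
        · simp at h
          tauto
      · rcases ih _ _ _ hc with h | h | h
        · tauto
        · exact Or.inr (Or.inl (by simp [h]))
        · simp at h
          rcases h with rfl | h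
          · exact Or.inr (Or.inl (by simp))
          · exact Or.inr (Or.inr h)

theorem mem_splitOn_go_subset (sep : List Char) :
    ∀ (fuel : Nat) (l cur : List Char) (acc : List (List Char)) (p : List Char),
      p ∈ PySem.Chars.splitOn.go sep fuel l cur acc →
        p ∈ acc ∨ ∀ c ∈ p, c ∈ cur ∨ c ∈ l := by
  intro fuel
  induction fuel with
  | zero =>
    intro l cur acc p hp
    rw [PySem.Chars.splitOn.go] at hp
    simp at hp
    rcases hp with hp | rfl
    · tauto
    · right; intro c hc; simp at hc; tauto
  | succ n ih =>
    intro l cur acc p hp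
    cases l with
    | nil =>
      rw [PySem.Chars.splitOn.go] at hp
      · simp at hp
        rcases hp with hp | rfl
        · tauto
        · right; intro c hc; simp at hc; tauto
      · omega
    | cons a t =>
      rw [PySem.Chars.splitOn.go] at hp
      split at hp
      · rcases ih _ _ _ _ hp with h | h
        · simp at h
          rcases h with rfl | h
          · right; intro c hc; simp at hc; tauto
          · tauto
        · right
          intro c hc
          rcases h c hc with h' | h'
          · simp at h'
          · exact Or.inr (List.mem_of_mem_drop h')
      · rcases ih _ _ _ _ hp with h | h
        · tauto
        · right
          intro c hc
          rcases h c hc with h' | h'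
          · simp at h'
            rcases h' with rfl | h'
            · right; simp
            · left; exact h'
          · right; simp [h']

theorem splitOn_single_no_sep (d : Char) :
    ∀ (fuel : Nat) (l cur : List Char) (acc : List (List Char)),
      l.length < fuel → d ∉ cur →
      ∀ p ∈ PySem.Chars.splitOn.go [d] fuel l cur acc, p ∈ acc ∨ d ∉ p := by
  intro fuel
  induction fuel with
  | zero => intro l cur acc h; omega
  | succ n ih =>
    intro l cur acc hlen hcur p hp
    cases l with
    | nil =>
      rw [PySem.Chars.splitOn.go] at hp
      · simp at hp
        rcases hp with hp | rfl
        · tauto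
        · right; simp [hcur]
      · omega
    | cons a t =>
      rw [PySem.Chars.splitOn.go] at hp
      split at hp
      · rename_i hpre
        have hd : List.drop ([d] : List Char).length (a :: t) = t := rfl
        rw [hd] at hp
        rcases ih t [] (cur.reverse :: acc) (by simp at hlen; omega) (by simp) p hp with h | h
        · rcases List.mem_cons.mp h with rfl | h
          · right; simp [hcur]
          · tauto
        · tauto
      · rename_i hpre
        have had : a ≠ d := by
          simp [List.isPrefixOf] at hpre
          exact fun h => hpre h.symm
        exact ih t (a :: cur) acc (by simp at hlen ⊢; omega)
          (by simp; exact ⟨fun h => had h.symm, hcur⟩) p hp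

theorem mem_replace_empty (sold : List Char) (hne : sold ≠ []) (s : List Char) (c : Char)
    (hc : c ∈ PySem.Chars.replace s sold []) : c ∈ s := by
  rw [PySem.Chars.replace, if_neg (by simp [hne])] at hc
  rcases mem_replace_go sold [] _ _ _ _ hc with h | h | h
  · simp at h
  · exact h
  · simp at h

theorem noSlash_options (pf : String) :
    ∀ seg ∈ pySplit pf "/", ∀ o ∈ optionsOf seg, '/' ∉ o.toList := by
  intro seg hseg
  obtain ⟨pc, hpc, rfl⟩ := List.mem_map.mp hseg
  have hpc' : '/' ∉ pc := by
    rw [show ("/" : String).toList = ['/'] by decide, PySem.Chars.splitOn] at hpc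
    rcases splitOn_single_no_sep '/' (pf.toList.length + 1) pf.toList [] []
        (by omega) (by simp) pc hpc with h | h
    · simp at h
    · exact h
  intro o ho
  rw [optionsOf] at ho
  split at ho
  · obtain ⟨qc, hqc, rfl⟩ := List.mem_map.mp ho
    rw [String.toList_ofList]
    intro hsl
    have hq : '/' ∈ (PySem.Str.replace (PySem.Str.replace (String.ofList pc) "{" "") "}" "").toList := by
      rw [PySem.Chars.splitOn] at hqc
      rcases mem_splitOn_go_subset (("," : String).toList) _ _ _ _ qc hqc with h | h
      · simp at h
      · rcases h '/' hsl with h' | h'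
        · simp at h'
        · exact h'
    rw [PySem.Str.replace, String.toList_ofList,
      show ("}" : String).toList = ['}'] by decide,
      show ("" : String).toList = [] by decide] at hq
    have h2 := mem_replace_empty ['}'] (by simp) _ _ hq
    rw [PySem.Str.replace, String.toList_ofList, String.toList_ofList,
      show ("{" : String).toList = ['{'] by decide,
      show ("" : String).toList = [] by decide] at h2
    exact hpc' (mem_replace_empty ['{'] (by simp) _ _ h2)
  · rcases List.mem_singleton.mp ho with rfl
    rw [String.toList_ofList]
    exact hpc'

-- ---- the core equivalence on char lists ----

theorem expandC_eq (lvls : List (List (List Char))) (first : Bool)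
    (h : ∀ lvl ∈ lvls, ∀ o ∈ lvl, '/' ∉ o) :
    expandC lvls first
      = (pyProduct lvls).filterMap (fun tup =>
          if okTup tup then some (glueC first tup) else none) := by
  induction lvls generalizing first with
  | nil => cases first <;> simp [expandC, pyProduct, okTup, glueC]
  | cons opts rest ih =>
    have hrest : ∀ lvl ∈ rest, ∀ o ∈ lvl, '/' ∉ o := fun lvl hl => h lvl (by simp [hl])
    simp only [expandC, pyProduct]
    rw [List.filterMap_flatMap]
    apply List.flatMap_congr
    intro o _
    rw [List.filterMap_map]
    cases rest with
    | nil =>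
      cases first <;>
        simp [expandC, pyProduct, okTup, glueC, List.filterMap, connC]
    | cons r rs =>
      by_cases he : PySem.Chars.endswith o ['.'] = true
      · rw [if_pos (by simp [he])]
        symm
        rw [List.filterMap_eq_nil_iff]
        intro tup htup
        obtain ⟨y, ys, rfl⟩ := mem_pyProduct_cons r tup rs htup
        have : okTup (o :: y :: ys) = false := by simp [okTup, he]
        simp [Function.comp, this]
      · rw [if_neg (by simp [he]), ih false hrest, List.map_filterMap]
        apply List.filterMap_congr
        intro tup htup
        obtain ⟨y, ys, rfl⟩ := mem_pyProduct_cons r tup rs htup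
        have hok : okTup (o :: y :: ys) = okTup (y :: ys) := by
          simp [okTup, he]
        cases hok2 : okTup (y :: ys) <;>
          cases first <;>
            simp [Function.comp, hok, hok2, glueC, connC]

theorem AC_eq (lvls : List (List (List Char))) (h : ∀ lvl ∈ lvls, ∀ o ∈ lvl, '/' ∉ o) :
    (pyProduct lvls).filterMap (fun tup =>
        if PySem.Chars.isIn ['.', '/'] (PySem.Chars.join ['/'] tup) then none
        else some (PySem.Chars.replace (PySem.Chars.join ['/'] tup) ['/', '.'] []))
      = (pyProduct lvls).filterMap (fun tup =>
          if okTup tup then some (glueC true tup) else none) := by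
  apply List.filterMap_congr
  intro tup htup
  have hts : ∀ x ∈ tup, '/' ∉ x := by
    intro x hx
    obtain ⟨lvl, hl, hxl⟩ := mem_mem_pyProduct lvls tup htup x hx
    exact h lvl hl x hxl
  rw [isIn_join_eq tup hts, replace_eq_dotScan]
  cases hok : okTup tup
  · simp
  · simp only [Bool.not_true, Bool.false_eq_true, if_false, if_true]
    cases tup with
    | nil => simp [PySem.Chars.join, List.intercalate, glueC, dotScan]
    | cons o t =>
      rw [join_cons_flat, dotScan_noSlash_append o _ (hts o (by simp)),
        dotScan_tailStr t (fun y hy => hts y (by simp [hy]))]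
      simp [glueC]

-- ---- lifting the String-level ports to the char level ----

theorem connectorB_toList (o : String) : (connectorB o).toList = connC o.toList := by
  rw [connectorB, connC, PySem.Str.startswith, show ("." : String).toList = ['.'] by decide]
  rw [PySem.Chars.startswith]
  split
  · rw [PySem.Str.slice, String.toList_ofList, PySem.Chars.slice_eq_listSlice,
      PySem.List.slice_from o.toList (by norm_num : (0 : Int) ≤ 1)]
    rfl
  · rw [strCat, String.toList_ofList, show ("/" : String).toList = ['/'] by decide]
    rfl

theorem expandB_eq_expandC (segs : List String) (first : Bool) :
    expandB segs first
      = (expandC (segs.map (fun s => (optionsOf s).map String.toList)) first).map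
          String.ofList := by
  induction segs generalizing first with
  | nil =>
    simp [expandB, expandC]
  | cons seg rest ih =>
    have hfun : (fun (out : List String) (o : String) =>
        if !rest.isEmpty && PySem.Str.endswith o "." then out
        else out ++ (expandB rest false).map (fun t => strCat (if first then o else connectorB o) t))
      = fun out o => out ++ (if !rest.isEmpty && PySem.Str.endswith o "." then []
          else (expandB rest false).map (fun t => strCat (if first then o else connectorB o) t)) := by
      funext out o
      split <;> simp
    simp only [expandB]
    rw [hfun, PySem.List.foldl_append_eq_flatMap, List.nil_append]
    simp only [List.map_cons, expandC]
    rw [List.flatMap_map, List.map_flatMap]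
    apply List.flatMap_congr
    intro o _
    have hguard : (!(rest.map (fun s => (optionsOf s).map String.toList)).isEmpty
        && PySem.Chars.endswith o.toList ['.'])
        = (!rest.isEmpty && PySem.Str.endswith o ".") := by
      rw [PySem.Str.endswith, show ("." : String).toList = ['.'] by decide, List.isEmpty_map]
    try simp only [Function.comp_apply]
    rw [hguard]
    split
    · simp
    · rw [ih false, List.map_map, List.map_map]
      apply List.map_congr_left
      intro t _
      simp only [Function.comp_apply]
      rw [strCat, String.toList_ofList]
      cases first
      · rw [if_neg (by simp), if_neg (by simp), connectorB_toList]
      · rw [if_pos rfl, if_pos rfl]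

-- ===== VERDICT (by name: the statement is the Claim_ definition above) =====
theorem find_described_purposes_spec : Claim_equal_find_described_purposes := by
  intro pf _
  show (pyProduct ((pySplit pf "/").foldl (fun acc level =>
      acc ++ [if PySem.Str.isIn "{" level then
                pySplit (PySem.Str.replace (PySem.Str.replace level "{" "") "}" "") ","
              else [level]]) [])).foldl (fun acc purpose_list =>
        if PySem.Str.isIn "./" (PySem.Str.join "/" purpose_list) then acc
        else acc ++ [PySem.Str.replace (PySem.Str.join "/" purpose_list) "/." ""]) []
      = expandB (pySplit pf "/") true
  rw [PySem.List.foldl_append_singleton_eq_map, List.nil_append]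
  have hopt : (fun (level : String) =>
      if PySem.Str.isIn "{" level then
        pySplit (PySem.Str.replace (PySem.Str.replace level "{" "") "}" "") ","
      else [level]) = optionsOf := rfl
  rw [hopt]
  have hfun : (fun (acc : List String) (purpose_list : List String) =>
      let purpose := PySem.Str.join "/" purpose_list
      if PySem.Str.isIn "./" purpose then acc
      else acc ++ [PySem.Str.replace purpose "/." ""])
    = fun acc purpose_list => acc ++ (if PySem.Str.isIn "./" (PySem.Str.join "/" purpose_list) then []
        else [PySem.Str.replace (PySem.Str.join "/" purpose_list) "/." ""]) := by
    funext acc pl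
    simp only []
    split <;> simp
  rw [hfun, PySem.List.foldl_append_eq_flatMap, List.nil_append,
    flatMap_if_eq_filterMap]
  have hno : ∀ lvl ∈ (pySplit pf "/").map (fun s => (optionsOf s).map String.toList),
      ∀ o ∈ lvl, '/' ∉ o := by
    intro lvl hl o ho
    obtain ⟨seg, hseg, rfl⟩ := List.mem_map.mp hl
    obtain ⟨os, hos, rfl⟩ := List.mem_map.mp ho
    exact noSlash_options pf seg hseg os hos
  rw [expandB_eq_expandC, expandC_eq _ true hno, ← AC_eq _ hno]
  rw [show (pySplit pf "/").map (fun s => (optionsOf s).map String.toList)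
        = ((pySplit pf "/").map optionsOf).map (List.map String.toList) from by
      rw [List.map_map]; rfl]
  rw [pyProduct_map, List.filterMap_map, List.map_filterMap]
  apply List.filterMap_congr
  intro tup _
  simp only [Function.comp_apply]
  have hiff : PySem.Str.isIn "./" (PySem.Str.join "/" tup)
      = PySem.Chars.isIn ['.', '/'] (PySem.Chars.join ['/'] (tup.map String.toList)) := by
    rw [PySem.Str.isIn, PySem.Str.join,
      show ("./" : String).toList = ['.', '/'] by decide, String.toList_ofList,
      show ("/" : String).toList = ['/'] by decide]
  rw [hiff]
  split
  · simp
  · simp only [Option.map_some]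
    congr 1
    rw [PySem.Str.replace, PySem.Str.join,
      show ("/." : String).toList = ['/', '.'] by decide,
      show ("" : String).toList = [] by decide, String.toList_ofList,
      show ("/" : String).toList = ['/'] by decide]
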